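-- pv_equiv track=rewrite | github.com/jgoliszewski/GoliszewskiJakub-MaturyPR | zbior zadan cke/61 - python/zadanie61.py | szescian
-- ===== SOURCE A (Python) =====
-- szesciany = [x**3 for x in range(101)]
--
-- def szescian(list):
-- 	x = 0
-- 	for l in list:
-- 		if l in szesciany:
-- 			if l > x:
-- 				x = l
-- 	if x != 0:
-- 		return x
-- ===== SOURCE B (Python) =====
-- def szescian(list):
--     best = 0
--     for l in list:
--         if 0 <= l <= 1000000:
--             lo, hi = 0, 100
--             while lo < hi:  # binary search for the integer cube root of l
--                 mid = (lo + hi + 1) // 2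
--                 if mid ** 3 <= l:
--                     lo = mid
--                 else:
--                     hi = mid - 1
--             if lo ** 3 == l and l > best:
--                 best = l
--     return best if best != 0 else None
-- ===== Notes on version B (the rewrite author's own statement) =====
-- stated objective: faster
-- what changed: Replaces the precomputed 101-entry cube table and its linear membership scan per element by an on-the-fly integer cube root computed with binary search between 0 and 100, checked for exactness.
import Mathlib
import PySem

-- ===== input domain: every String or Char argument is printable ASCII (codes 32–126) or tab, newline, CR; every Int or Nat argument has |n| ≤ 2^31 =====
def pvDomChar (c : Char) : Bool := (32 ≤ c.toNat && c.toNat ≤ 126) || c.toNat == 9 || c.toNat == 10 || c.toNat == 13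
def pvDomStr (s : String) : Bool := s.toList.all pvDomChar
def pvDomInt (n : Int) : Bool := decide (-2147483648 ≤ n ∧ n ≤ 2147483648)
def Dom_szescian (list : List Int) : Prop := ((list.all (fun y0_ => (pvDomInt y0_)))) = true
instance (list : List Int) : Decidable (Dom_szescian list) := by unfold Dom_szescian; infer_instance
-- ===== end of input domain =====

-- B replaces A's precomputed cube table and linear membership scan by a binary-search integer cube root checked for exactness; measurably faster by a constant factor.


-- ===== PORT A =====
-- module-level table: [x**3 for x in range(101)]
def szesciany : List Int := (PySem.List.pyRange 0 101 1).map (fun x => x ^ 3)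

def szescian (list : List Int) : Option Int :=
  let x := list.foldl (fun x l => if l ∈ szesciany then (if l > x then l else x) else x) 0
  if x ≠ 0 then some x else none

-- ===== PORT B =====
-- midpoint bounds, used for the termination of the while-loop port below
theorem mid_bounds (lo hi : Int) (h : lo < hi) :
    lo < PySem.Int.floordiv (lo + hi + 1) 2 ∧ PySem.Int.floordiv (lo + hi + 1) 2 ≤ hi := by
  simp only [PySem.Int.floordiv]; rw [Int.fdiv_eq_ediv]; omega

-- the while-loop binary search: largest mid in [lo,hi] with mid**3 <= l
def icbrtLoop (l lo hi : Int) : Int :=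
  if h : lo < hi then
    let mid := PySem.Int.floordiv (lo + hi + 1) 2
    if mid ^ 3 ≤ l then icbrtLoop l mid hi else icbrtLoop l lo (mid - 1)
  else lo
termination_by (hi - lo).toNat
decreasing_by
  all_goals (have hb := mid_bounds lo hi h; simp only [PySem.Int.floordiv] at *; omega)

def szescian_alt (list : List Int) : Option Int :=
  let best := list.foldl (fun best l =>
    if 0 ≤ l ∧ l ≤ 1000000 then
      let lo := icbrtLoop l 0 100
      if lo ^ 3 = l ∧ l > best then l else best
    else best) 0
  if best ≠ 0 then some best else none

-- ===== PRECONDITION & SPEC =====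
def Spec_szescian (list : List Int) (out : Option Int) : Prop := out = szescian_alt list
instance (list : List Int) (out : Option Int) : Decidable (Spec_szescian list out) := by unfold Spec_szescian; infer_instance

-- ===== CLAIM (what is proved, stated in full; the proofs are below) =====
def Claim_equal_szescian : Prop := ∀ (list : List Int), Dom_szescian list → Spec_szescian list (szescian list)

-- ===== LEMMAS AND PROOFS =====

-- binary search invariant: the result r satisfies lo ≤ r ≤ hi, r^3 ≤ l < (r+1)^3
theorem icbrtLoop_spec (l lo hi : Int) (hle : lo ≤ hi) (h2 : lo ^ 3 ≤ l) (h3 : l < (hi + 1) ^ 3) :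
    lo ≤ icbrtLoop l lo hi ∧ icbrtLoop l lo hi ≤ hi ∧
    (icbrtLoop l lo hi) ^ 3 ≤ l ∧ l < (icbrtLoop l lo hi + 1) ^ 3 := by
  by_cases h : lo < hi
  · have hmid := mid_bounds lo hi h
    rw [icbrtLoop]
    simp only [h, dif_pos]
    set mid := PySem.Int.floordiv (lo + hi + 1) 2 with hm
    by_cases hc : mid ^ 3 ≤ l
    · simp only [hc, if_pos]
      have ih := icbrtLoop_spec l mid hi hmid.2 hc h3
      exact ⟨le_trans (le_of_lt hmid.1) ih.1, ih.2.1, ih.2.2⟩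
    · simp only [hc, if_neg, not_false_iff]
      have h3' : l < (mid - 1 + 1) ^ 3 := by simpa using lt_of_not_ge hc
      have ih := icbrtLoop_spec l lo (mid - 1) (by omega) h2 h3'
      exact ⟨ih.1, by omega, ih.2.2⟩
  · have heq : lo = hi := le_antisymm hle (not_lt.mp h)
    rw [icbrtLoop]
    simp only [h, dif_neg, not_false_iff]
    exact ⟨le_refl _, le_of_eq heq, h2, heq ▸ h3⟩
termination_by (hi - lo).toNat
decreasing_by
  · have := mid_bounds lo hi h; omega
  · have := mid_bounds lo hi h; omega

-- membership in A's cube table characterised by B's exactness test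
theorem mem_szesciany_iff (l : Int) :
    l ∈ szesciany ↔ (0 ≤ l ∧ l ≤ 1000000 ∧ (icbrtLoop l 0 100) ^ 3 = l) := by
  constructor
  · intro hmem
    simp only [szesciany, List.mem_map, PySem.List.mem_pyRange_one] at hmem
    obtain ⟨r, ⟨hr0, hr101⟩, hrl⟩ := hmem
    subst hrl
    have hcube : (0:Int) ≤ r ^ 3 := by positivity
    have hub : r ^ 3 ≤ 1000000 := by
      have : r ^ 3 ≤ 100 ^ 3 := pow_le_pow_left₀ hr0 (by omega) 3
      linarith [this]
    refine ⟨hcube, hub, ?_⟩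
    have hs := icbrtLoop_spec (r ^ 3) 0 100 (by norm_num) (by positivity) (by nlinarith)
    set q := icbrtLoop (r ^ 3) 0 100 with hq
    have h1 : q ≤ r := by
      by_contra hlt
      have : (r + 1) ^ 3 ≤ q ^ 3 := pow_le_pow_left₀ (by omega) (by omega) 3
      nlinarith [hs.2.2.1]
    have h2 : r ≤ q := by
      by_contra hlt
      have : (q + 1) ^ 3 ≤ r ^ 3 := pow_le_pow_left₀ (by linarith [hs.1]) (by omega) 3
      nlinarith [hs.2.2.2]
    rw [le_antisymm h1 h2]
  · rintro ⟨h0, h1M, hcube⟩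
    have hs := icbrtLoop_spec l 0 100 (by norm_num) (by simpa using h0) (by nlinarith)
    set q := icbrtLoop l 0 100 with hq
    simp only [szesciany, List.mem_map, PySem.List.mem_pyRange_one]
    exact ⟨q, ⟨hs.1, by omega⟩, hcube⟩

-- the two fold step functions agree pointwise
theorem step_eq (x l : Int) :
    (if l ∈ szesciany then (if l > x then l else x) else x) =
    (if 0 ≤ l ∧ l ≤ 1000000 then
      (if (icbrtLoop l 0 100) ^ 3 = l ∧ l > x then l else x) else x) := by
  simp only [propext (mem_szesciany_iff l)]
  split_ifs <;> tauto

-- ===== VERDICT (by name: the statement is the Claim_ definition above) =====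
theorem szescian_spec : Claim_equal_szescian := by
  intro list _
  unfold Spec_szescian szescian szescian_alt
  have : (fun x l => if l ∈ szesciany then (if l > x then l else x) else x) =
      (fun best l => if 0 ≤ l ∧ l ≤ 1000000 then
        (if (icbrtLoop l 0 100) ^ 3 = l ∧ l > best then l else best) else best) := by
    funext x l; exact step_eq x l
  rw [this]
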